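-- pv_equiv track=rewrite | github.com/gskishan004/Document-Identifier | lib/get_move_list.py | main_get_move_list
-- ===== SOURCE A (Python) =====
-- def supported_doc(folder,doc_spans_multiple_page):
-- 	for doc in doc_spans_multiple_page:
-- 		if (folder.lower() == doc.lower()):
-- 			return 1
-- 	return 0
--
-- def check_if_not_equal(filename, files_to_remove_list):
-- 	for i in range (0,len(files_to_remove_list)):
-- 		if (filename == files_to_remove_list[i]):
-- 			return 0
-- 	return 1
--
-- def main_get_move_list(output_folder_list, doc_spans_multiple_page):
-- 	final_move_list= []
-- 	files_to_remove = []
-- 	start_list = []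
-- 	end_list = []
-- 	doc_type_list = []
--
-- 	for i in range (0, len(output_folder_list)):
-- 		if (supported_doc(output_folder_list[i][0], doc_spans_multiple_page)):
-- 			doc_type_list.append(output_folder_list[i][0])
-- 			j = i
-- 			while (output_folder_list[j][0] == "No_Match" or output_folder_list[j][0] == output_folder_list[i][0]):
-- 				if (j+1 > len(output_folder_list)-1):
-- 					j+=1
-- 					break
-- 				else:
-- 					j+=1
--
-- 			start_list.append (i)
-- 			end_list.append (j-1)
-- 			i = min (j+1, len(output_folder_list))
--
-- 	for i in range (0, len(doc_type_list)):
-- 		folder_name = output_folder_list[start_list[i]][0] + "_" + str(i)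
-- 		for j in range (start_list[i], end_list[i] + 1):
-- 			files_to_remove.append(output_folder_list[j][1])
-- 			final_move_list.append((output_folder_list[j][1], folder_name))
--
-- 	files_to_remove = list (set(files_to_remove))
--
-- 	for i in range (0, len(output_folder_list)):
-- 		if (check_if_not_equal (output_folder_list[i][1],files_to_remove)):
-- 			final_move_list.append((output_folder_list[i][1], output_folder_list[i][0]))
--
--
-- 	return final_move_list
-- ===== SOURCE B (Python) =====
-- def main_get_move_list(output_folder_list, doc_spans_multiple_page):
--     n = len(output_folder_list)
--     folders = [p[0] for p in output_folder_list]
--     files = [p[1] for p in output_folder_list]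
--     supported = {d.lower() for d in doc_spans_multiple_page}
--
--     # One backward pass: end[i] = last index of A's forward run starting at i
--     # (entries equal to folders[i] or "No_Match"), memoised so each i is O(1).
--     ends = [0] * n
--     nxt = n  # first index > current position holding a non-"No_Match" folder
--     for i in range(n - 1, -1, -1):
--         k = nxt
--         if k < n and folders[k] == folders[i]:
--             ends[i] = ends[k]
--         else:
--             ends[i] = k - 1
--         if folders[i] != "No_Match":
--             nxt = i
--
--     moves = []
--     removed = set()
--     cnt = 0
--     for i in range(n):
--         if folders[i].lower() in supported:
--             folder_name = folders[i] + "_" + str(cnt)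
--             cnt += 1
--             for j in range(i, ends[i] + 1):
--                 removed.add(files[j])
--                 moves.append((files[j], folder_name))
--     for f, file in zip(folders, files):
--         if file not in removed:
--             moves.append((file, f))
--     return moves
-- ===== Notes on version B (the rewrite author's own statement) =====
-- stated objective: faster
-- what changed: Replaces A's per-index forward while-scan for run ends and its linear scans for supported-doc and files-to-remove membership with one memoised backward pass computing all run ends plus set lookups, fusing the first two loops into one pass.
import Mathlib
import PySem

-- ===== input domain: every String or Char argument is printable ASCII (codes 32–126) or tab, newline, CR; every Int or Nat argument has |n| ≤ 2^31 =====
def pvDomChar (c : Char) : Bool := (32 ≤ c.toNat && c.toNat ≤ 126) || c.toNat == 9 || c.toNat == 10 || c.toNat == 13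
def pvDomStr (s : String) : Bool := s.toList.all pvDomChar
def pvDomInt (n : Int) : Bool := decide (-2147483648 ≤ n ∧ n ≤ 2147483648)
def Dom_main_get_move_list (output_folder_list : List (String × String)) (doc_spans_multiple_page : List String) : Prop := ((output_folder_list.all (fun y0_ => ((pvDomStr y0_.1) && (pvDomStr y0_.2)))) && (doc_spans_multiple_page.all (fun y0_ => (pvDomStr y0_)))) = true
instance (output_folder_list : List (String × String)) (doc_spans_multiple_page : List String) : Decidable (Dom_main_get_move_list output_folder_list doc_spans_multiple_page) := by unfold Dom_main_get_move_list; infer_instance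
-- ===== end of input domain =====

-- B groups the spanning-document runs with one memoised backward pass (O(N+D))
-- instead of A's per-index forward while-scan plus linear membership scans (O(N^2+N*D)).
-- A mutates nothing; the equivalence is about the return value.

-- ===== PORT A =====
def supportedDoc (folder : String) (docs : List String) : Int :=
  match docs with
  | [] => 0
  | d :: rest => if PySem.Str.lower folder == PySem.Str.lower d then 1 else supportedDoc folder rest

def checkIfNotEqual (filename : String) (lst : List String) : Int :=
  match lst with
  | [] => 1
  | x :: rest => if filename == x then 0 else checkIfNotEqual filename rest

-- A's inner while loop: advances j while folders[j] is "No_Match" or equals fi,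
-- breaking (after one last increment) when j+1 would leave the list.
def whileA (ofl : List (String × String)) (fi : String) (j : Nat) : Nat :=
  let fj := (ofl.getD j ("", "")).1
  if fj == "No_Match" || fj == fi then
    if ofl.length - 1 < j + 1 then j + 1
    else whileA ofl fi (j + 1)
  else j
termination_by ofl.length - j
decreasing_by omega

def main_get_move_list (output_folder_list : List (String × String)) (doc_spans_multiple_page : List String) : List (String × String) :=
  let ofl := output_folder_list
  let n := ofl.length
  -- first loop: collect doc_type_list / start_list / end_list
  let acc1 := (List.range n).foldl (fun (acc : List String × List Nat × List Nat) i =>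
      if supportedDoc (ofl.getD i ("", "")).1 doc_spans_multiple_page ≠ 0 then
        let j := whileA ofl (ofl.getD i ("", "")).1 i
        (acc.1 ++ [(ofl.getD i ("", "")).1], acc.2.1 ++ [i], acc.2.2 ++ [j - 1])
      else acc) ([], [], [])
  let dtl := acc1.1
  let sl := acc1.2.1
  let el := acc1.2.2
  -- second loop: files_to_remove and the grouped part of final_move_list
  let acc2 := (List.range dtl.length).foldl (fun (acc : List String × List (String × String)) idx =>
      let folderName := (ofl.getD (sl.getD idx 0) ("", "")).1 ++ "_" ++ PySem.Int.toStr (idx : Int)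
      (List.range' (sl.getD idx 0) (el.getD idx 0 + 1 - sl.getD idx 0)).foldl
        (fun (acc2 : List String × List (String × String)) j =>
          (acc2.1 ++ [(ofl.getD j ("", "")).2], acc2.2 ++ [((ofl.getD j ("", "")).2, folderName)])) acc)
      ([], [])
  -- files_to_remove = list(set(...)); only membership is used afterwards
  let ftr : List String := PySem.Set.ofList acc2.1
  -- third loop: keep files not scheduled for removal
  (List.range n).foldl (fun fml i =>
      if checkIfNotEqual (ofl.getD i ("", "")).2 ftr ≠ 0 then
        fml ++ [((ofl.getD i ("", "")).2, (ofl.getD i ("", "")).1)]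
      else fml) acc2.2

-- ===== PORT B =====
-- backward pass of Source B: returns (nxt, ends) for the processed suffix starting at pos
def buildEndsB (n : Nat) : List String → Nat → Nat × List Nat
  | [], _ => (n, [])
  | f :: rest, pos =>
      let r := buildEndsB n rest (pos + 1)
      let k := r.1
      let e := if k < n then
                 (if rest.getD (k - (pos + 1)) "" == f then r.2.getD (k - (pos + 1)) 0 else k - 1)
               else k - 1
      ((if f == "No_Match" then k else pos), e :: r.2)

def main_get_move_list_alt (output_folder_list : List (String × String)) (doc_spans_multiple_page : List String) : List (String × String) :=
  let n := output_folder_list.length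
  let folders := output_folder_list.map Prod.fst
  let files := output_folder_list.map Prod.snd
  let supported : PySem.Set String := PySem.Set.ofList (doc_spans_multiple_page.map PySem.Str.lower)
  let ends := (buildEndsB n folders 0).2
  let acc := (List.range n).foldl (fun (acc : List (String × String) × PySem.Set String × Nat) i =>
      if PySem.Set.contains supported (PySem.Str.lower (folders.getD i "")) then
        let folderName := folders.getD i "" ++ "_" ++ PySem.Int.toStr (acc.2.2 : Int)
        let inner := (List.range' i (ends.getD i 0 + 1 - i)).foldl
          (fun (mr : List (String × String) × PySem.Set String) j =>
            (mr.1 ++ [(files.getD j "", folderName)], PySem.Set.add mr.2 (files.getD j ""))) (acc.1, acc.2.1)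
        (inner.1, inner.2, acc.2.2 + 1)
      else acc) ([], PySem.Set.empty, 0)
  (folders.zip files).foldl (fun mv pr =>
      if PySem.Set.contains acc.2.1 pr.2 then mv else mv ++ [(pr.2, pr.1)]) acc.1

-- ===== PRECONDITION & SPEC =====
def Spec_main_get_move_list (output_folder_list : List (String × String)) (doc_spans_multiple_page : List String) (out : List (String × String)) : Prop := out = main_get_move_list_alt output_folder_list doc_spans_multiple_page
instance (output_folder_list : List (String × String)) (doc_spans_multiple_page : List String) (out : List (String × String)) : Decidable (Spec_main_get_move_list output_folder_list doc_spans_multiple_page out) := by unfold Spec_main_get_move_list; infer_instance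

-- ===== CLAIM (what is proved, stated in full; the proofs are below) =====
def Claim_equal_main_get_move_list : Prop := ∀ (output_folder_list : List (String × String)) (doc_spans_multiple_page : List String), Dom_main_get_move_list output_folder_list doc_spans_multiple_page → Spec_main_get_move_list output_folder_list doc_spans_multiple_page (main_get_move_list output_folder_list doc_spans_multiple_page)

-- ===== LEMMAS AND PROOFS =====

-- getD through map fst / snd
@[simp] theorem getD_map_fst (ofl : List (String × String)) (i : Nat) :
    (ofl.map Prod.fst).getD i "" = (ofl.getD i ("", "")).1 := by
  simp [List.getD, List.getElem?_map]
  cases ofl[i]? <;> simp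

@[simp] theorem getD_map_snd (ofl : List (String × String)) (i : Nat) :
    (ofl.map Prod.snd).getD i "" = (ofl.getD i ("", "")).2 := by
  simp [List.getD, List.getElem?_map]
  cases ofl[i]? <;> simp

-- spec-side recursions mirroring B's backward pass
def nxtS (fs : List String) (p : Nat) : Nat :=
  if h : p < fs.length then (if fs[p] = "No_Match" then nxtS fs (p + 1) else p)
  else fs.length
termination_by fs.length - p

theorem nxtS_lt_imp (fs : List String) (p : Nat) (h : nxtS fs p < fs.length) : p ≤ nxtS fs p := by
  unfold nxtS at *
  split at h
  · split at h
    · have := nxtS_lt_imp fs (p + 1) (by simpa [*] using h)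
      simp_all
      omega
    · simp_all
  · omega
termination_by fs.length - p

theorem nxtS_le (fs : List String) (p : Nat) : nxtS fs p ≤ fs.length := by
  unfold nxtS
  split
  · split
    · exact nxtS_le fs (p + 1)
    · omega
  · omega
termination_by fs.length - p

def endS (fs : List String) (i : Nat) : Nat :=
  let k := nxtS fs (i + 1)
  if h : k < fs.length then
    (if fs[k] = fs.getD i "" then endS fs k else k - 1)
  else k - 1
termination_by fs.length - i
decreasing_by
  have := nxtS_lt_imp fs (i + 1) h
  omega

theorem buildEndsB_drop (fs : List String) (pos : Nat) :
    buildEndsB fs.length (fs.drop pos) pos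
      = (nxtS fs pos, (List.range' pos (fs.length - pos)).map (endS fs)) := by
  by_cases hp : pos < fs.length
  · have hx : nxtS fs pos = if fs[pos] = "No_Match" then nxtS fs (pos + 1) else pos := by
      rw [nxtS, dif_pos hp]
    have hrange : fs.length - pos = (fs.length - (pos + 1)) + 1 := by omega
    rw [List.drop_eq_getElem_cons hp, buildEndsB, buildEndsB_drop fs (pos + 1), hx,
      hrange, List.range'_succ, List.map_cons]
    dsimp only
    refine Prod.ext ?_ ?_
    · dsimp only
      by_cases hm : fs[pos] = "No_Match" <;> simp [hm]
    · dsimp only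
      congr 1
      have hy : endS fs pos =
          (if h : nxtS fs (pos + 1) < fs.length then
            (if fs[nxtS fs (pos + 1)]'h = fs.getD pos "" then endS fs (nxtS fs (pos + 1))
             else nxtS fs (pos + 1) - 1)
           else nxtS fs (pos + 1) - 1) := by
        rw [endS]
      rw [hy]
      by_cases hkl : nxtS fs (pos + 1) < fs.length
      · have hks : pos + 1 ≤ nxtS fs (pos + 1) := nxtS_lt_imp fs (pos + 1) hkl
        have hg1 : (fs.drop (pos + 1)).getD (nxtS fs (pos + 1) - (pos + 1)) ""
            = fs[nxtS fs (pos + 1)]'hkl := by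
          rw [List.getD_eq_getElem _ _ (by simp only [List.length_drop]; omega)]
          rw [List.getElem_drop]
          congr 1
          omega
        have hg2 : ((List.range' (pos + 1) (fs.length - (pos + 1))).map (endS fs)).getD
            (nxtS fs (pos + 1) - (pos + 1)) 0 = endS fs (nxtS fs (pos + 1)) := by
          rw [List.getD_eq_getElem _ _ (by simp only [List.length_map, List.length_range']; omega)]
          rw [List.getElem_map, List.getElem_range']
          congr 1
          omega
        rw [if_pos hkl, dif_pos hkl, hg1, hg2]
        have hgp : fs.getD pos "" = fs[pos] := List.getD_eq_getElem fs "" hp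
        by_cases he : fs[nxtS fs (pos + 1)]'hkl = fs[pos]
        · rw [if_pos (by simp [he]), if_pos (by rw [hgp]; exact he)]
        · rw [if_neg (by simp [he]), if_neg (by rw [hgp]; exact he)]
      · rw [if_neg hkl, dif_neg hkl]
  · have hd : fs.drop pos = [] := List.drop_eq_nil_of_le (by omega)
    have hr : fs.length - pos = 0 := by omega
    rw [hd, hr, buildEndsB, nxtS, dif_neg hp]
    simp
termination_by fs.length - pos
decreasing_by omega

theorem whileA_skip (ofl : List (String × String)) (fi : String) (j : Nat) (hj : j < ofl.length)
    (hcond : (ofl.map Prod.fst).getD j "" = "No_Match" ∨ (ofl.map Prod.fst).getD j "" = fi) :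
    whileA ofl fi j =
      (if nxtS (ofl.map Prod.fst) (j + 1) < ofl.length then
        (if (ofl.map Prod.fst).getD (nxtS (ofl.map Prod.fst) (j + 1)) "" = fi
         then whileA ofl fi (nxtS (ofl.map Prod.fst) (j + 1)) else nxtS (ofl.map Prod.fst) (j + 1))
       else ofl.length) := by
  have hlen : (ofl.map Prod.fst).length = ofl.length := by simp
  have hc : ((ofl.getD j ("", "")).1 == "No_Match" || (ofl.getD j ("", "")).1 == fi) = true := by
    simp only [getD_map_fst] at hcond
    rcases hcond with h | h <;> simp only [List.getD] at h <;> simp [h]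
  rw [whileA]
  simp only [hc, if_true]
  by_cases hj1 : ofl.length - 1 < j + 1
  · -- j = length - 1 : the loop breaks with j+1 = length
    have hjl : j + 1 = ofl.length := by omega
    have hn : nxtS (ofl.map Prod.fst) (j + 1) = ofl.length := by
      rw [nxtS]
      simp [hjl]
    rw [if_pos hj1, hn, if_neg (lt_irrefl ofl.length)]
    exact hjl
  · have hj2 : j + 1 < ofl.length := by omega
    rw [if_neg hj1]
    by_cases hnm : (ofl.map Prod.fst).getD (j + 1) "" = "No_Match"
    · -- skip the No_Match entry: nxtS (j+1) = nxtS (j+2), and recurse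
      have hn : nxtS (ofl.map Prod.fst) (j + 1) = nxtS (ofl.map Prod.fst) (j + 2) := by
        rw [nxtS]
        rw [dif_pos (by omega)]
        rw [if_pos (by rwa [List.getD_eq_getElem _ _ (by omega)] at hnm)]
      rw [whileA_skip ofl fi (j + 1) hj2 (Or.inl hnm), hn]
    · have hn : nxtS (ofl.map Prod.fst) (j + 1) = j + 1 := by
        rw [nxtS]
        rw [dif_pos (by omega)]
        rw [if_neg (by rwa [List.getD_eq_getElem _ _ (by omega)] at hnm)]
      rw [hn, if_pos hj2]
      by_cases hfi : (ofl.map Prod.fst).getD (j + 1) "" = fi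
      · rw [if_pos hfi]
      · -- the loop stops right at j+1
        rw [if_neg hfi, whileA]
        have hc2 : (((ofl.getD (j + 1) ("", "")).1 == "No_Match") || ((ofl.getD (j + 1) ("", "")).1 == fi)) = false := by
          simp only [getD_map_fst] at hnm hfi
          simp only [List.getD] at hnm hfi
          simp [hnm, hfi]
        simp only [hc2, Bool.false_eq_true, if_false]
termination_by ofl.length - j

theorem whileA_eq_endS (ofl : List (String × String)) (i : Nat) (hi : i < ofl.length) :
    whileA ofl ((ofl.map Prod.fst).getD i "") i = endS (ofl.map Prod.fst) i + 1 := by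
  have hlen : (ofl.map Prod.fst).length = ofl.length := by simp
  rw [whileA_skip ofl ((ofl.map Prod.fst).getD i "") i hi (Or.inr rfl), endS]
  by_cases h : nxtS (ofl.map Prod.fst) (i + 1) < ofl.length
  · have hks : i + 1 ≤ nxtS (ofl.map Prod.fst) (i + 1) :=
      nxtS_lt_imp (ofl.map Prod.fst) (i + 1) (by omega)
    rw [if_pos h, dif_pos (by omega)]
    by_cases he : (ofl.map Prod.fst)[nxtS (ofl.map Prod.fst) (i + 1)]'(by omega)
        = (ofl.map Prod.fst).getD i ""
    · rw [if_pos he]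
      have hgd : (ofl.map Prod.fst).getD (nxtS (ofl.map Prod.fst) (i + 1)) ""
          = (ofl.map Prod.fst).getD i "" := by
        rw [List.getD_eq_getElem _ _ (by omega)]
        exact he
      rw [if_pos hgd, ← hgd]
      exact whileA_eq_endS ofl (nxtS (ofl.map Prod.fst) (i + 1)) h
    · rw [if_neg he]
      have hgd : ¬ (ofl.map Prod.fst).getD (nxtS (ofl.map Prod.fst) (i + 1)) ""
          = (ofl.map Prod.fst).getD i "" := by
        rw [List.getD_eq_getElem _ _ (by omega)]
        exact he
      rw [if_neg hgd]
      omega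
  · rw [if_neg h, dif_neg (by omega)]
    have := nxtS_le (ofl.map Prod.fst) (i + 1)
    omega
termination_by ofl.length - i
decreasing_by omega

-- supportedDoc / checkIfNotEqual characterisations
theorem supportedDoc_iff (f : String) (docs : List String) :
    supportedDoc f docs ≠ 0 ↔ PySem.Str.lower f ∈ docs.map PySem.Str.lower := by
  induction docs with
  | nil => simp [supportedDoc]
  | cons d rest ih =>
      by_cases h : PySem.Str.lower f = PySem.Str.lower d <;>
        simp [supportedDoc, h, ih]

theorem checkIfNotEqual_eq (x : String) (l : List String) :
    checkIfNotEqual x l = if x ∈ l then 0 else 1 := by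
  induction l with
  | nil => simp [checkIfNotEqual]
  | cons y rest ih =>
      by_cases h : x = y <;> simp [checkIfNotEqual, h, ih]

-- the common second-pass shape
def segB (ofl : List (String × String)) (i c : Nat) : List (String × String) :=
  (List.range' i (endS (ofl.map Prod.fst) i + 1 - i)).map
    (fun j => ((ofl.getD j ("", "")).2, (ofl.getD i ("", "")).1 ++ "_" ++ PySem.Int.toStr (c : Int)))

def pass2 (ofl : List (String × String)) : List Nat → Nat → List (String × String) → List (String × String)
  | [], _, acc => acc
  | i :: rest, c, acc => pass2 ofl rest (c + 1) (acc ++ segB ofl i c)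

theorem pass2_acc (ofl : List (String × String)) (l : List Nat) (c : Nat) (acc : List (String × String)) :
    pass2 ofl l c acc = acc ++ pass2 ofl l c [] := by
  induction l generalizing c acc with
  | nil => simp [pass2]
  | cons i rest ih =>
      rw [pass2, pass2, ih, ih (acc := [] ++ segB ofl i c)]
      simp

-- the index list of supported positions
def SIdx (ofl : List (String × String)) (docs : List String) : List Nat :=
  (List.range ofl.length).filter (fun i => decide (supportedDoc ((ofl.map Prod.fst).getD i "") docs ≠ 0))

-- loop-1 closed form
theorem loop1_eq (ofl : List (String × String)) (docs : List String)
    (l : List Nat) (acc : List String × List Nat × List Nat) :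
    l.foldl (fun (acc : List String × List Nat × List Nat) i =>
      if supportedDoc (ofl.getD i ("", "")).1 docs ≠ 0 then
        let j := whileA ofl (ofl.getD i ("", "")).1 i
        (acc.1 ++ [(ofl.getD i ("", "")).1], acc.2.1 ++ [i], acc.2.2 ++ [j - 1])
      else acc) acc
    = (acc.1 ++ (l.filter (fun i => decide (supportedDoc ((ofl.map Prod.fst).getD i "") docs ≠ 0))).map (fun i => (ofl.getD i ("", "")).1),
       acc.2.1 ++ l.filter (fun i => decide (supportedDoc ((ofl.map Prod.fst).getD i "") docs ≠ 0)),
       acc.2.2 ++ (l.filter (fun i => decide (supportedDoc ((ofl.map Prod.fst).getD i "") docs ≠ 0))).map (fun i => whileA ofl (ofl.getD i ("", "")).1 i - 1)) := by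
  induction l generalizing acc with
  | nil => simp
  | cons i rest ih =>
      by_cases h : supportedDoc (ofl.getD i ("", "")).1 docs ≠ 0
      all_goals
        have h' := h
        simp only [List.getD] at h'
        simp only [List.foldl_cons, List.filter_cons, getD_map_fst, ih]
        simp [h, h']

theorem inner_pair_eq {β γ : Type} (u : Nat → β) (v : Nat → γ) (l : List Nat) (acc : List β × List γ) :
    l.foldl (fun (a : List β × List γ) j => (a.1 ++ [u j], a.2 ++ [v j])) acc
      = (acc.1 ++ l.map u, acc.2 ++ l.map v) := by
  induction l generalizing acc with
  | nil => simp
  | cons j rest ih => simp [ih]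

-- A's loop 2 equals pass2
theorem loop2A_eq (ofl : List (String × String)) (S : List Nat)
    (hS : ∀ i ∈ S, i < ofl.length) (k : Nat) (acc : List String × List (String × String)) :
    (List.range' k (S.length - k)).foldl (fun (acc : List String × List (String × String)) idx =>
      (List.range' (S.getD idx 0) ((S.map (fun i => whileA ofl (ofl.getD i ("", "")).1 i - 1)).getD idx 0 + 1 - S.getD idx 0)).foldl
        (fun (acc2 : List String × List (String × String)) j =>
          (acc2.1 ++ [(ofl.getD j ("", "")).2], acc2.2 ++ [((ofl.getD j ("", "")).2, (ofl.getD (S.getD idx 0) ("", "")).1 ++ "_" ++ PySem.Int.toStr (idx : Int))])) acc) acc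
    = (acc.1 ++ (pass2 ofl (S.drop k) k []).map Prod.fst, acc.2 ++ pass2 ofl (S.drop k) k []) := by
  by_cases hk : k < S.length
  · have h1 : S.length - k = (S.length - (k + 1)) + 1 := by omega
    have hSk : S.getD k 0 = S[k] := List.getD_eq_getElem S 0 hk
    have hmem : S[k] < ofl.length := hS _ (S.getElem_mem hk)
    have hwe := whileA_eq_endS ofl (S[k]) hmem
    rw [getD_map_fst] at hwe
    have hel : (S.map (fun i => whileA ofl (ofl.getD i ("", "")).1 i - 1)).getD k 0
        = endS (ofl.map Prod.fst) (S[k]) := by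
      rw [List.getD_eq_getElem _ _ (by simpa using hk), List.getElem_map, hwe]
      omega
    rw [h1, List.range'_succ, List.foldl_cons]
    rw [hSk, hel, inner_pair_eq]
    rw [loop2A_eq ofl S hS (k + 1) _]
    have hdrop : S.drop k = S[k] :: S.drop (k + 1) := List.drop_eq_getElem_cons hk
    rw [hdrop, pass2, pass2_acc ofl (S.drop (k + 1)) (k + 1) ([] ++ segB ofl (S[k]) k),
      List.nil_append]
    have hv : (List.range' (S[k]) (endS (ofl.map Prod.fst) (S[k]) + 1 - S[k])).map
        (fun j => ((ofl.getD j ("", "")).2, (ofl.getD (S[k]) ("", "")).1 ++ "_" ++ PySem.Int.toStr (k : Int)))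
        = segB ofl (S[k]) k := by
      rw [segB]
    have hu : (List.range' (S[k]) (endS (ofl.map Prod.fst) (S[k]) + 1 - S[k])).map
        (fun j => (ofl.getD j ("", "")).2) = (segB ofl (S[k]) k).map Prod.fst := by
      rw [segB, List.map_map]
      rfl
    rw [hv, hu]
    simp [List.map_append, List.append_assoc]
  · have h0 : S.length - k = 0 := by omega
    rw [h0, List.drop_eq_nil_of_le (by omega)]
    simp [pass2]
termination_by S.length - k
decreasing_by omega

-- B's inner fold
theorem innerB_eq (g : Nat → String) (nm : String) (l : List Nat)
    (mv : List (String × String)) (rm : PySem.Set String) :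
    l.foldl (fun (mr : List (String × String) × PySem.Set String) j =>
        (mr.1 ++ [(g j, nm)], PySem.Set.add mr.2 (g j))) (mv, rm)
      = (mv ++ l.map (fun j => (g j, nm)), (l.map g).foldl PySem.Set.add rm) := by
  induction l generalizing mv rm with
  | nil => simp
  | cons j rest ih => simp [ih]

-- B's main fold over the supported indices
theorem loopB_eq (ofl : List (String × String)) (p : Nat → Bool) (l : List Nat)
    (hS : ∀ i ∈ l, i < ofl.length) (c : Nat) (mv : List (String × String)) (rm : PySem.Set String) :
    l.foldl (fun (acc : List (String × String) × PySem.Set String × Nat) i =>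
        if p i = true then
          (((List.range' i (((buildEndsB ofl.length (ofl.map Prod.fst) 0).2).getD i 0 + 1 - i)).foldl
              (fun (mr : List (String × String) × PySem.Set String) j =>
                (mr.1 ++ [((ofl.map Prod.snd).getD j "", (ofl.map Prod.fst).getD i "" ++ "_" ++ PySem.Int.toStr (acc.2.2 : Int))],
                  PySem.Set.add mr.2 ((ofl.map Prod.snd).getD j ""))) (acc.1, acc.2.1)).1,
           ((List.range' i (((buildEndsB ofl.length (ofl.map Prod.fst) 0).2).getD i 0 + 1 - i)).foldl
              (fun (mr : List (String × String) × PySem.Set String) j =>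
                (mr.1 ++ [((ofl.map Prod.snd).getD j "", (ofl.map Prod.fst).getD i "" ++ "_" ++ PySem.Int.toStr (acc.2.2 : Int))],
                  PySem.Set.add mr.2 ((ofl.map Prod.snd).getD j ""))) (acc.1, acc.2.1)).2,
           acc.2.2 + 1)
        else acc) (mv, rm, c)
      = (mv ++ pass2 ofl (l.filter p) c [],
         ((pass2 ofl (l.filter p) c []).map Prod.fst).foldl PySem.Set.add rm,
         c + (l.filter p).length) := by
  induction l generalizing c mv rm with
  | nil => simp [pass2]
  | cons i rest ih =>
      have hrest : ∀ x ∈ rest, x < ofl.length := fun x hx => hS x (by simp [hx])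
      rw [List.foldl_cons, List.filter_cons]
      by_cases hp : p i = true
      · have hi : i < ofl.length := hS i (by simp)
        have hfs : (ofl.map Prod.fst).length = ofl.length := by simp
        have hends : ((buildEndsB ofl.length (ofl.map Prod.fst) 0).2).getD i 0
            = endS (ofl.map Prod.fst) i := by
          have hb := buildEndsB_drop (ofl.map Prod.fst) 0
          rw [List.drop_zero, hfs] at hb
          rw [hb]
          rw [List.getD_eq_getElem _ _ (by simp only [List.length_map, List.length_range']; omega)]
          rw [List.getElem_map, List.getElem_range']
          simp
        rw [if_pos hp, hends, innerB_eq]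
        dsimp only
        rw [ih hrest]
        rw [hp, if_pos rfl]
        rw [pass2, pass2_acc ofl (rest.filter p) (c + 1) ([] ++ segB ofl i c), List.nil_append]
        have hseg : (List.range' i (endS (ofl.map Prod.fst) i + 1 - i)).map
            (fun j => ((ofl.map Prod.snd).getD j "", (ofl.map Prod.fst).getD i "" ++ "_" ++ PySem.Int.toStr (c : Int)))
            = segB ofl i c := by
          rw [segB]
          simp only [getD_map_fst, getD_map_snd]
        have hsegf : (List.range' i (endS (ofl.map Prod.fst) i + 1 - i)).map
            (fun j => (ofl.map Prod.snd).getD j "") = (segB ofl i c).map Prod.fst := by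
          rw [segB, List.map_map]
          simp only [getD_map_snd]
          rfl
        rw [hseg, hsegf]
        simp [List.map_append, List.foldl_append, List.append_assoc]
        omega
      · rw [if_neg hp, ih hrest]
        simp only [Bool.not_eq_true] at hp
        rw [hp, if_neg (by simp)]

-- fold over range with getD = fold over the list (loop 3 of A)
theorem foldl_range'_getD {α β : Type} (l : List α) (d : α) (F : β → α → β) (k : Nat) (acc : β) :
    (List.range' k (l.length - k)).foldl (fun acc i => F acc (l.getD i d)) acc
      = (l.drop k).foldl F acc := by
  by_cases hk : k < l.length
  · have h1 : l.length - k = (l.length - (k + 1)) + 1 := by omega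
    rw [h1, List.range'_succ, List.foldl_cons, List.drop_eq_getElem_cons hk, List.foldl_cons,
      List.getD_eq_getElem l d hk]
    exact foldl_range'_getD l d F (k + 1) (F acc l[k])
  · have h1 : l.length - k = 0 := by omega
    rw [h1, List.drop_eq_nil_of_le (by omega)]
    rfl
termination_by l.length - k

theorem foldl_range_getD {α β : Type} (l : List α) (d : α) (F : β → α → β) (acc : β) :
    (List.range l.length).foldl (fun acc i => F acc (l.getD i d)) acc = l.foldl F acc := by
  have := foldl_range'_getD l d F 0 acc
  simpa [List.range_eq_range'] using this

-- ===== VERDICT (by name: the statement is the Claim_ definition above) =====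
theorem loop3A_eq (ofl : List (String × String)) (ftr : List String) (acc : List (String × String)) :
    (List.range ofl.length).foldl (fun fml i =>
        if checkIfNotEqual (ofl.getD i ("", "")).2 ftr ≠ 0 then
          fml ++ [((ofl.getD i ("", "")).2, (ofl.getD i ("", "")).1)]
        else fml) acc
      = ofl.foldl (fun fml p =>
          if checkIfNotEqual p.2 ftr ≠ 0 then fml ++ [(p.2, p.1)] else fml) acc :=
  foldl_range_getD ofl ("", "")
    (fun fml p => if checkIfNotEqual p.2 ftr ≠ 0 then fml ++ [(p.2, p.1)] else fml) acc

theorem condB_eq (ofl : List (String × String)) (docs : List String) (i : Nat) :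
    PySem.Set.contains (PySem.Set.ofList (docs.map PySem.Str.lower))
        (PySem.Str.lower ((ofl.map Prod.fst).getD i ""))
      = decide (supportedDoc ((ofl.map Prod.fst).getD i "") docs ≠ 0) := by
  rw [Bool.eq_iff_iff, PySem.Set.contains_iff, PySem.Set.mem_ofList, decide_eq_true_iff]
  exact (supportedDoc_iff _ docs).symm

theorem main_get_move_list_spec : Claim_equal_main_get_move_list := by
  intro ofl docs _
  unfold Spec_main_get_move_list main_get_move_list main_get_move_list_alt
  dsimp only
  set S := (List.range ofl.length).filter
      (fun i => decide (supportedDoc ((ofl.map Prod.fst).getD i "") docs ≠ 0)) with hSdef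
  have hS : ∀ i ∈ S, i < ofl.length := by
    intro i hi
    rw [hSdef] at hi
    exact List.mem_range.mp (List.mem_filter.mp hi).1
  -- A side
  rw [loop1_eq ofl docs (List.range ofl.length) ([], [], [])]
  dsimp only
  simp only [List.nil_append, List.length_map, ← hSdef]
  rw [List.range_eq_range', show S.length = S.length - 0 from rfl,
    loop2A_eq ofl S hS 0 ([], [])]
  dsimp only
  simp only [List.nil_append, List.drop_zero]
  -- B side
  rw [List.zip_map']
  simp only [Prod.mk.eta, List.map_id']
  rw [loopB_eq ofl
    (fun i => PySem.Set.contains (PySem.Set.ofList (docs.map PySem.Str.lower))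
      (PySem.Str.lower ((ofl.map Prod.fst).getD i "")))
    (List.range ofl.length) (fun i hi => List.mem_range.mp hi) 0 [] PySem.Set.empty]
  rw [List.filter_congr (fun i _ => condB_eq ofl docs i), ← hSdef]
  dsimp only
  simp only [List.nil_append]
  have hrm : ((pass2 ofl S 0 []).map Prod.fst).foldl PySem.Set.add PySem.Set.empty
      = PySem.Set.ofList ((pass2 ofl S 0 []).map Prod.fst) :=
    (PySem.Set.ofList_eq_foldl _).symm
  rw [hrm]
  refine (loop3A_eq ofl (PySem.Set.ofList (List.map Prod.fst (pass2 ofl S 0 [])))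
    (pass2 ofl S 0 [])).trans ?_
  apply PySem.List.foldl_congr_mem
  intro acc p _
  by_cases hm : p.2 ∈ PySem.Set.ofList ((pass2 ofl S 0 []).map Prod.fst)
  · simp [checkIfNotEqual_eq, hm]
  · simp [checkIfNotEqual_eq, hm]
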